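-- pv_equiv track=rewrite | github.com/lduraja/HW06 | assignment_6_1.py | footpath_generator
-- ===== SOURCE A (Python) =====
-- def footpath_generator(path_len=11):
--     """
--     Drunkard simulation driver function.
--
--     :param int path_len: total size of footpath, must be odd
--     :rtype: string
--     :return: final resting place of drunkard, should be 'home' or 'pub' or 'darkness'
--     """
--     current_pos = int(path_len / 2)
--     FOOTPATH = "_"
--     DRUNKARD = "X"
--     TARGET_1 = "home"
--     TARGET_2 = "pub"
--     footpath = []
--     if path_len < 3:
--         return None
--     elif path_len % 2 == 0:
--         return None
--     for i in range(path_len):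
--         if i == 0:
--             footpath.append(TARGET_1)
--         elif i == path_len - 1:
--             footpath.append(TARGET_2)
--         elif i == (path_len - 1) / 2:
--             footpath.append(DRUNKARD)
--         else:
--             footpath.append(FOOTPATH)
--     return footpath
-- ===== SOURCE B (Python) =====
-- # B: bulk-default list plus three positional overwrites instead of a branching append loop (simpler, same O(n)).
-- def footpath_generator(path_len=11):
--     if path_len < 3 or path_len % 2 == 0:
--         return None
--     footpath = ["_"] * path_len
--     footpath[0] = "home"
--     footpath[-1] = "pub"
--     footpath[path_len // 2] = "X"
--     return footpath
-- ===== Notes on version B (the rewrite author's own statement) =====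
-- stated objective: simpler
-- what changed: Replaced the four-way branching append loop over range(path_len) by bulk construction of ['_']*path_len followed by three positional assignments (home at 0, pub at -1, X at path_len//2).
import Mathlib
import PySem

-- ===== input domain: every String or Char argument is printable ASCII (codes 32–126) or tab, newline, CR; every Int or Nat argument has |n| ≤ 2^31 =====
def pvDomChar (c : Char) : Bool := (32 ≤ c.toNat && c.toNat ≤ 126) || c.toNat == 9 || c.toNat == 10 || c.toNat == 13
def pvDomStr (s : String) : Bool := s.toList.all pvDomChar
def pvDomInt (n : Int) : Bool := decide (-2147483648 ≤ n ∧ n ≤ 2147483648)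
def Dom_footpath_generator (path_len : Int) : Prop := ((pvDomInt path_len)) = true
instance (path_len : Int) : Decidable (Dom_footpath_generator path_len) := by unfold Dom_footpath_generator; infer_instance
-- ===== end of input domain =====

-- B replaces A's four-way branching append loop by bulk construction ['_']*path_len plus three positional assignments (simpler; same O(n) cost).


-- ===== PORT A =====
-- literal port of A; 'i == (path_len-1)/2' is Python float division, exact here since the
-- loop only runs when path_len is odd (path_len-1 even), ported as '2*i == path_len - 1'.
def footpath_generator (path_len : Int) : Option (List String) :=
  if path_len < 3 then none
  else if PySem.Int.mod path_len 2 == 0 then none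
  else some ((PySem.List.pyRange 0 path_len 1).foldl (fun acc i =>
    if i == 0 then acc ++ ["home"]
    else if i == path_len - 1 then acc ++ ["pub"]
    else if 2 * i == path_len - 1 then acc ++ ["X"]
    else acc ++ ["_"]) [])

-- ===== PORT B =====
-- B builds then patches: footpath[-1] on the nonempty list is index n-1.
def footpath_generator_alt (path_len : Int) : Option (List String) :=
  if path_len < 3 || PySem.Int.mod path_len 2 == 0 then none
  else
    let n := path_len.toNat
    some ((((List.replicate n "_").set 0 "home").set (n - 1) "pub").set
      (PySem.Int.floordiv path_len 2).toNat "X")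

-- ===== PRECONDITION & SPEC =====
def Spec_footpath_generator (path_len : Int) (out : Option (List String)) : Prop := out = footpath_generator_alt path_len
instance (path_len : Int) (out : Option (List String)) : Decidable (Spec_footpath_generator path_len out) := by unfold Spec_footpath_generator; infer_instance

-- ===== CLAIM (what is proved, stated in full; the proofs are below) =====
def Claim_equal_footpath_generator : Prop := ∀ (path_len : Int), Dom_footpath_generator path_len → Spec_footpath_generator path_len (footpath_generator path_len)

-- ===== LEMMAS AND PROOFS =====

-- ===== VERDICT (by name: the statement is the Claim_ definition above) =====
theorem main_eq (path_len : Int) (h3 : 3 ≤ path_len) (hodd : path_len % 2 = 1) :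
    footpath_generator path_len = footpath_generator_alt path_len := by
  have hnl : ¬ path_len < 3 := by omega
  have hm : ¬ (PySem.Int.mod path_len 2 = 0) := by
    simp [PySem.Int.mod, Int.fmod_eq_emod]; omega
  unfold footpath_generator footpath_generator_alt
  rw [if_neg hnl, if_neg (by simpa using hm),
    if_neg (by simp [hnl, PySem.Int.mod, Int.fmod_eq_emod]; omega)]
  congr 1
  obtain ⟨n, rfl⟩ := Int.eq_ofNat_of_zero_le (by omega : (0:Int) ≤ path_len)
  have hfun : (fun (acc : List String) (i : Int) =>
      if (i == 0) = true then acc ++ ["home"]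
      else if (i == (n:Int) - 1) = true then acc ++ ["pub"]
      else if (2 * i == (n:Int) - 1) = true then acc ++ ["X"]
      else acc ++ ["_"])
      = fun acc i => acc ++ [if (i == 0) = true then "home"
          else if (i == (n:Int) - 1) = true then "pub"
          else if (2 * i == (n:Int) - 1) = true then "X" else "_"] := by
    funext acc i; split_ifs <;> rfl
  rw [PySem.List.pyRange_zero_natCast, hfun, PySem.List.foldl_append_singleton_eq_map]
  have hdiv : PySem.Int.floordiv ((n:Int)) 2 = (n:Int) / 2 := by
    simp [PySem.Int.floordiv, Int.fdiv_eq_ediv]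
  rw [hdiv]
  apply List.ext_getElem
  · simp
  · intro i h1 h2
    simp only [List.nil_append, List.getElem_map, List.getElem_range, List.getElem_set,
      List.getElem_replicate, beq_iff_eq]
    split_ifs with c1 c2 c3 d1 d2 d3 <;>
      first
        | rfl
        | (exfalso; omega)

theorem footpath_generator_spec : Claim_equal_footpath_generator := by
  intro p _
  unfold Spec_footpath_generator
  by_cases h3 : p < 3
  · simp [footpath_generator, footpath_generator_alt, h3]
  · by_cases he : p % 2 = 0
    · simp [footpath_generator, footpath_generator_alt, PySem.Int.mod, Int.fmod_eq_emod, he, h3]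
    · exact (main_eq p (not_lt.mp h3) (Int.emod_two_eq p |>.resolve_left he)).symm ▸ rfl
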